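-- pv_equiv track=rewrite | github.com/luccasfoliveira/Exercicios_Fatec | Avaliação_03_-_Arquivo_Texto/av03.py | validar_usuario
-- ===== SOURCE A (Python) =====
-- def validar_usuario(usarname: str) -> bool:
--     if len(usarname) > 8:
--         especial = letra = numero = False
--         for caracter in usarname:
--             if caracter in ['_', '.']:
--                 especial = True
--             elif caracter.isalpha():
--                 letra = True
--             elif caracter.isdigit():
--                 numero = True
--             if especial and letra and numero:
--                 return True
--     return False
-- ===== SOURCE B (Python) =====
-- def validar_usuario(usarname: str) -> bool:
--     return (len(usarname) > 8
--             and any(c in ('_', '.') for c in usarname)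
--             and any(c.isalpha() for c in usarname)
--             and any(c.isdigit() for c in usarname))
-- ===== Notes on version B (the rewrite author's own statement) =====
-- stated objective: idiomatic
-- what changed: Replaced the single flag-maintaining loop with early exit by one boolean expression: a length guard and three independent short-circuiting any() scans, one per required character class.
import Mathlib
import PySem

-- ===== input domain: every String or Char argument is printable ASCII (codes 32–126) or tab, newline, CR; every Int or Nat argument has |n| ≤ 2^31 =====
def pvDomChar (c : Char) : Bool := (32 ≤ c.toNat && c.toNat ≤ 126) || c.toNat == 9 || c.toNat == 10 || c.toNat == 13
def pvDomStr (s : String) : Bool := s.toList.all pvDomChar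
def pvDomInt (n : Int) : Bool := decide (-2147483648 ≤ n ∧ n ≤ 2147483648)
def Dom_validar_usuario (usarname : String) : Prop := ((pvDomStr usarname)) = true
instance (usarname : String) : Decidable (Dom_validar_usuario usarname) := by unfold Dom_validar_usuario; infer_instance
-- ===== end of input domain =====

-- B replaces A's single flag-maintaining loop with early exit by a length guard plus three independent short-circuiting presence scans (idiomatic; same cost).

-- ===== PORT A =====
-- A's for-loop: three flags, elif chain (each elif condition includes the negation of the earlier ones), early return once all three flags are set
def validar_usuario_loop : List Char → Bool → Bool → Bool → Bool
  | [], _, _, _ => false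
  | c :: cs, especial, letra, numero =>
    let sp := ['_', '.'].contains c
    let especial' := if sp then true else especial
    let letra' := if !sp && PySem.Chars.isalpha c then true else letra
    let numero' := if !sp && !(PySem.Chars.isalpha c) && PySem.Chars.isdigit c then true else numero
    if especial' && letra' && numero' then true
    else validar_usuario_loop cs especial' letra' numero'

def validar_usuario (usarname : String) : Bool :=
  if PySem.Str.len usarname > 8 then
    validar_usuario_loop usarname.toList false false false
  else false

-- ===== PORT B =====
def validar_usuario_alt (usarname : String) : Bool :=
  decide (PySem.Str.len usarname > 8)
    && usarname.toList.any (fun c => c == '_' || c == '.')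
    && usarname.toList.any PySem.Chars.isalpha
    && usarname.toList.any PySem.Chars.isdigit

-- ===== PRECONDITION & SPEC =====
def Spec_validar_usuario (usarname : String) (out : Bool) : Prop := out = validar_usuario_alt usarname
instance (usarname : String) (out : Bool) : Decidable (Spec_validar_usuario usarname out) := by unfold Spec_validar_usuario; infer_instance

-- ===== CLAIM (what is proved, stated in full; the proofs are below) =====
def Claim_equal_validar_usuario : Prop := ∀ (usarname : String), Dom_validar_usuario usarname → Spec_validar_usuario usarname (validar_usuario usarname)

-- ===== LEMMAS AND PROOFS =====

-- a digit character is not alphabetic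
lemma digit_not_alpha (c : Char) (h : PySem.Chars.isdigit c = true) :
    PySem.Chars.isalpha c = false := by
  simp [PySem.Chars.isdigit, Char.le_def, UInt32.le_iff_toNat_le] at h
  simp [PySem.Chars.isalpha, PySem.Chars.isupper, PySem.Chars.islower, Char.le_def, UInt32.le_iff_toNat_le]
  omega

-- a digit character is neither '_' nor '.'
lemma digit_not_spec (c : Char) (h : PySem.Chars.isdigit c = true) :
    (c == '_' || c == '.') = false := by
  simp [PySem.Chars.isdigit, Char.le_def, UInt32.le_iff_toNat_le] at h
  simp only [Bool.or_eq_false_iff, beq_eq_false_iff_ne, ne_eq]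
  constructor <;> rintro rfl <;> simp_all

-- '_' and '.' are not alphabetic
lemma spec_not_alpha (c : Char) (h : (c == '_' || c == '.') = true) :
    PySem.Chars.isalpha c = false := by
  rcases Bool.or_eq_true_iff.1 h with h | h <;> rw [eq_of_beq h] <;> decide

lemma contains_pair (c : Char) : ['_', '.'].contains c = (c == '_' || c == '.') := by
  simp only [List.contains_cons, List.contains_nil, Bool.or_false]

-- invariant: while not all three flags are set, A's loop computes the three presence tests
lemma loop_eq (cs : List Char) : ∀ (e l n : Bool), (e && l && n) = false →
    validar_usuario_loop cs e l n =
      ((e || cs.any (fun c => c == '_' || c == '.'))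
        && (l || cs.any PySem.Chars.isalpha)
        && (n || cs.any PySem.Chars.isdigit)) := by
  induction cs with
  | nil => intro e l n h; simp [validar_usuario_loop]; simp_all
  | cons c cs ih =>
    intro e l n h0
    rw [validar_usuario_loop]
    simp only [contains_pair, List.any_cons]
    by_cases hsp : (c == '_' || c == '.') = true
    · have ha := spec_not_alpha c hsp
      have hd : PySem.Chars.isdigit c = false := by
        cases h' : PySem.Chars.isdigit c
        · rfl
        · rw [digit_not_spec c h'] at hsp; exact absurd hsp (by simp)
      simp only [hsp, ha, hd]
      cases e <;> cases l <;> cases n <;> simp_all [ih]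
    · have hsp' : (c == '_' || c == '.') = false := by simpa using hsp
      by_cases ha : PySem.Chars.isalpha c = true
      · have hd : PySem.Chars.isdigit c = false := by
          cases h' : PySem.Chars.isdigit c
          · rfl
          · rw [digit_not_alpha c h'] at ha; exact absurd ha (by simp)
        simp only [hsp', ha, hd]
        cases e <;> cases l <;> cases n <;> simp_all [ih]
      · have ha' : PySem.Chars.isalpha c = false := by simpa using ha
        simp only [hsp', ha']
        cases hd : PySem.Chars.isdigit c <;>
          (cases e <;> cases l <;> cases n <;> simp_all [ih])

-- ===== VERDICT (by name: the statement is the Claim_ definition above) =====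
theorem validar_usuario_spec : Claim_equal_validar_usuario := by
  intro s _
  unfold Spec_validar_usuario validar_usuario validar_usuario_alt
  by_cases h : PySem.Str.len s > 8
  · have h' : decide (PySem.Str.len s > 8) = true := by simpa using h
    rw [if_pos h, loop_eq s.toList false false false rfl]
    simp only [h', Bool.false_or, Bool.true_and, Bool.and_assoc]
  · have h' : decide (PySem.Str.len s > 8) = false := by simpa using h
    rw [if_neg h]
    simp only [h', Bool.false_and]
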